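-- pv_equiv track=rewrite | github.com/hvanchor/CS1010A | AY17:18 RE1 cs1010s-repractical-nov17-solution.py | num_atoms
-- ===== SOURCE A (Python) =====
-- def num_atoms(molecule):
--     num = 0
--     for c in molecule:
--         if c.isalpha():
--             num += 1
--         elif c.isdigit():
--             num += int(c) - 1
--     return num
-- ===== SOURCE B (Python) =====
-- def num_atoms(molecule):
--     # Three independent linear aggregates combined algebraically:
--     # each alpha contributes +1; each digit contributes int(c)-1
--     # = (sum of int(c) over digits) - (number of digits).
--     alpha_count = sum(1 for c in molecule if c.isalpha())
--     digits = [c for c in molecule if c.isdigit()]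
--     digit_sum = sum(int(c) for c in digits)
--     return alpha_count + digit_sum - len(digits)
-- ===== Notes on version B (the rewrite author's own statement) =====
-- stated objective: alternative
-- what changed: Replaces A's single fused loop with branch-dependent increments by three independent aggregates (alpha count, digit count, digit sum) combined via the identity int(c)-1 = int(c) minus one-per-digit.
import Mathlib
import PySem

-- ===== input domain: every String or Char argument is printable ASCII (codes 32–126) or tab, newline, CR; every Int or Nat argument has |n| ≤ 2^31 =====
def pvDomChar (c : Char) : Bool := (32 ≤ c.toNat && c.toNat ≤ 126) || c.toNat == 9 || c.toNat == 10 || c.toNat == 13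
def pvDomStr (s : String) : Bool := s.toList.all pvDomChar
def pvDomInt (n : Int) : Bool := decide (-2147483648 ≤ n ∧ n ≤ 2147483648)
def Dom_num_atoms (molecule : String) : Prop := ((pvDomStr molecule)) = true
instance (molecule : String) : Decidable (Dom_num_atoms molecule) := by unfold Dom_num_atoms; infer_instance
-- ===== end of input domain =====

-- B changes the decomposition only: three independent aggregates instead of A's fused
-- branching loop; same O(n) cost, same value on all of Dom.

-- ===== PORT A =====
-- int(c) for an ASCII digit c is exactly c.toNat - 48 (Dom admits only ASCII, where
-- isdigit holds exactly for '0'..'9', so int(c) never raises).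
def num_atoms (molecule : String) : Int :=
  molecule.toList.foldl (fun num c =>
    if PySem.Chars.isalpha c then num + 1
    else if PySem.Chars.isdigit c then num + (((c.toNat : Int) - 48) - 1)
    else num) 0

-- ===== PORT B =====
def num_atoms_alt (molecule : String) : Int :=
  let cs := molecule.toList
  let alpha_count : Int := ((cs.filter PySem.Chars.isalpha).length : Int)
  let digits := cs.filter PySem.Chars.isdigit
  let digit_sum : Int := (digits.map (fun c => ((c.toNat : Int) - 48))).sum
  alpha_count + digit_sum - (digits.length : Int)

-- ===== PRECONDITION & SPEC =====
def Spec_num_atoms (molecule : String) (out : Int) : Prop := out = num_atoms_alt molecule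
instance (molecule : String) (out : Int) : Decidable (Spec_num_atoms molecule out) := by unfold Spec_num_atoms; infer_instance

-- ===== CLAIM (what is proved, stated in full; the proofs are below) =====
def Claim_equal_num_atoms : Prop := ∀ (molecule : String), Dom_num_atoms molecule → Spec_num_atoms molecule (num_atoms molecule)

-- ===== LEMMAS AND PROOFS =====

theorem num_atoms_foldl_key (cs : List Char) (num : Int) :
    cs.foldl (fun num c =>
      if PySem.Chars.isalpha c then num + 1
      else if PySem.Chars.isdigit c then num + (((c.toNat : Int) - 48) - 1)
      else num) num
    = num + ((cs.filter PySem.Chars.isalpha).length : Int)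
        + ((cs.filter PySem.Chars.isdigit).map (fun c => ((c.toNat : Int) - 48))).sum
        - ((cs.filter PySem.Chars.isdigit).length : Int) := by
  induction cs generalizing num with
  | nil => simp
  | cons c cs ih =>
    simp only [List.foldl_cons, List.filter_cons]
    by_cases hA : PySem.Chars.isalpha c = true
    · have hD : PySem.Chars.isdigit c = false := by
        simp [PySem.Chars.isalpha, PySem.Chars.isdigit, PySem.Chars.isupper,
              PySem.Chars.islower, Char.le_def, UInt32.le_iff_toNat_le] at hA ⊢
        omega
      simp [hA, hD, ih]; ring
    · simp only [Bool.not_eq_true] at hA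
      by_cases hD : PySem.Chars.isdigit c = true
      · simp [hA, hD, ih]; ring
      · simp only [Bool.not_eq_true] at hD
        simp [hA, hD, ih]

-- ===== VERDICT (by name: the statement is the Claim_ definition above) =====
theorem num_atoms_spec : Claim_equal_num_atoms := by
  intro molecule _
  unfold Spec_num_atoms num_atoms num_atoms_alt
  simpa using num_atoms_foldl_key molecule.toList 0
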